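-- pv_equiv track=rewrite | github.com/pypi-data/pypi-mirror-395 | packages/odc-loader/odc_loader-0.6.0-py3-none-any.whl/odc/loader/_builder.py | _bin_by_time
-- ===== SOURCE A (Python) =====
-- from typing import (
--     Any,
--     Dict,
--     Hashable,
--     Iterable,
--     Iterator,
--     List,
--     Literal,
--     Mapping,
--     Optional,
--     Protocol,
--     Sequence,
--     Tuple,
--     TypeAlias,
--     cast,
-- )
--
-- def _bin_by_time(
--     tyx_bins: Mapping[tuple[int, int, int], Sequence[int]],
-- ) -> list[tuple[int, ...]]:
--     nt = max(t for t, _, _ in tyx_bins) + 1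
--     _bins: list[set[int]] = [set() for _ in range(nt)]
--     for (t, _, _), vv in tyx_bins.items():
--         _bins[t].update(vv)
--
--     return [tuple(sorted(b)) for b in _bins]
-- ===== SOURCE B (Python) =====
-- def _bin_by_time(tyx_bins):
--     nt = max(t for t, _, _ in tyx_bins) + 1
--     pairs = sorted({(t, v) for (t, _, _), vv in tyx_bins.items() for v in vv})
--     result = [[] for _ in range(nt)]
--     for t, v in pairs:
--         result[t].append(v)
--     return [tuple(r) for r in result]
-- ===== Notes on version B (the rewrite author's own statement) =====
-- stated objective: alternative
-- what changed: Replaces the per-bin mutable sets with per-bin sorts by one globally sorted deduplicated (t, value) pair list that is scattered into pre-allocated bins in a single ordered pass.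
-- outside the precondition, e.g. on _bin_by_time({(-1, 0, 0): [9], (1, 0, 0): [3]}): A returns [(), (3, 9)], B returns [(), (9, 3)]
import Mathlib
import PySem

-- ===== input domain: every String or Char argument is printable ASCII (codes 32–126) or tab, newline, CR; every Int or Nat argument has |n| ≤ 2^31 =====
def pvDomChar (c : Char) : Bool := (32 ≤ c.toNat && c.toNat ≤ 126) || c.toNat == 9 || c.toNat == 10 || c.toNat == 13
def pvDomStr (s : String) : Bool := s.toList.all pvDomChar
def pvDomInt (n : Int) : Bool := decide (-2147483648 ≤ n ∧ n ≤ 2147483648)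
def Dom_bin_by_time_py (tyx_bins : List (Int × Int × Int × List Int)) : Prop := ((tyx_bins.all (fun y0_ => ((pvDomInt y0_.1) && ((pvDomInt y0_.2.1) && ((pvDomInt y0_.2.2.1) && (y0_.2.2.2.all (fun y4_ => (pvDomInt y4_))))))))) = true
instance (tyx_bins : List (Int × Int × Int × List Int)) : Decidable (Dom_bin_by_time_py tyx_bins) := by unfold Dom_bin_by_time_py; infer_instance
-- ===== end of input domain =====

-- B replaces A's per-bin mutable sets and per-bin sorts by one globally sorted deduplicated
-- (t, value) pair list scattered into pre-allocated bins in a single ordered pass (objective: alternative).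

-- ===== PORT A =====
def bin_by_time_py (tyx_bins : List (Int × Int × Int × List Int)) : List (List Int) :=
  match PySem.List.max? (tyx_bins.map (fun x => x.1)) (fun t => t) with
  | none => []  -- max() on an empty iterable: ValueError, excluded by Pre_
  | some m =>
    let nt := m + 1
    let bins0 : List (PySem.Set Int) := (PySem.List.pyRange 0 nt).map (fun _ => PySem.Set.empty)
    let bins := tyx_bins.foldl (fun bs x =>
      PySem.List.pySetD bs x.1 (PySem.Set.update (PySem.List.pyGetD bs x.1 PySem.Set.empty) x.2.2.2)) bins0
    bins.map (fun b => PySem.List.sorted b (fun v => v))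

-- ===== PORT B =====
def bin_by_time_py_alt (tyx_bins : List (Int × Int × Int × List Int)) : List (List Int) :=
  match PySem.List.max? (tyx_bins.map (fun x => x.1)) (fun t => t) with
  | none => []  -- max() on an empty iterable: ValueError, excluded by Pre_
  | some m =>
    let nt := m + 1
    let pairs := PySem.List.sorted2
      (PySem.Set.ofList (tyx_bins.flatMap (fun x => x.2.2.2.map (fun v => (x.1, v)))))
      (fun p => p.1) (fun p => p.2)
    let result0 : List (List Int) := (PySem.List.pyRange 0 nt).map (fun _ => ([] : List Int))
    pairs.foldl (fun r p => PySem.List.pySetD r p.1 (PySem.List.pyGetD r p.1 [] ++ [p.2])) result0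

-- ===== PRECONDITION & SPEC =====
-- Pre_ excludes: the empty mapping, on which A raises ValueError; mappings with a negative
-- time index t, where A's (and B's) negative-index wraparound groupings are accidental
-- implementation artefacts (and A raises IndexError when the wrap underflows); and lists whose
-- (t, y, x) keys repeat, which cannot occur for a Python dict.
def Pre_bin_by_time_py (tyx_bins : List (Int × Int × Int × List Int)) : Prop :=
  tyx_bins ≠ [] ∧ (∀ x ∈ tyx_bins, 0 ≤ x.1) ∧
    List.Pairwise (fun a b => (a.1, a.2.1, a.2.2.1) ≠ (b.1, b.2.1, b.2.2.1)) tyx_bins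
instance (tyx_bins : List (Int × Int × Int × List Int)) : Decidable (Pre_bin_by_time_py tyx_bins) := by unfold Pre_bin_by_time_py; infer_instance

def pvWitness_bin_by_time_py : (List (Int × Int × Int × List Int)) :=
  [(0, 0, 0, [2, 1]), (2, 5, 5, [1, 1])]

def Spec_bin_by_time_py (tyx_bins : List (Int × Int × Int × List Int)) (out : List (List Int)) : Prop := out = bin_by_time_py_alt tyx_bins
instance (tyx_bins : List (Int × Int × Int × List Int)) (out : List (List Int)) : Decidable (Spec_bin_by_time_py tyx_bins out) := by unfold Spec_bin_by_time_py; infer_instance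

-- ===== CLAIM (what is proved, stated in full; the proofs are below) =====
def Claim_equal_bin_by_time_py : Prop := ∀ (tyx_bins : List (Int × Int × Int × List Int)), Dom_bin_by_time_py tyx_bins → Pre_bin_by_time_py tyx_bins → Spec_bin_by_time_py tyx_bins (bin_by_time_py tyx_bins)

-- ===== LEMMAS AND PROOFS =====

-- all (t, v) pairs generated by the input, in generation order
def pvPairs (tyx_bins : List (Int × Int × Int × List Int)) : List (Int × Int) :=
  tyx_bins.flatMap (fun x => x.2.2.2.map (fun v => (x.1, v)))

-- the values that land in bin i, in generation order (with duplicates)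
def pvVals (i : Int) (tyx_bins : List (Int × Int × Int × List Int)) : List Int :=
  ((pvPairs tyx_bins).filter (fun p => p.1 = i)).map Prod.snd

theorem pvVals_cons (i : Int) (x : Int × Int × Int × List Int) (xs : List (Int × Int × Int × List Int)) :
    pvVals i (x :: xs) = (if x.1 = i then x.2.2.2 else []) ++ pvVals i xs := by
  by_cases h : x.1 = i <;>
    simp [pvVals, pvPairs, List.filter_append, List.filter_map, Function.comp_def, h]

theorem mem_pvVals (i : Int) (tyx_bins : List (Int × Int × Int × List Int)) (v : Int) :
    v ∈ pvVals i tyx_bins ↔ (i, v) ∈ pvPairs tyx_bins := by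
  simp only [pvVals, List.mem_map, List.mem_filter]
  constructor
  · rintro ⟨p, ⟨hp, he⟩, rfl⟩
    have : p = (i, p.2) := by
      cases p; simp at he ⊢; omega
    rwa [this] at hp
  · intro h
    exact ⟨(i, v), ⟨h, by simp⟩, rfl⟩

-- the A-side gather invariant: the fold scattering each item's values into its bin's set
theorem gatherA (tyx_bins : List (Int × Int × Int × List Int)) :
    ∀ (bs : List (PySem.Set Int)),
      (∀ x ∈ tyx_bins, 0 ≤ x.1 ∧ x.1 < (bs.length : Int)) →
      ∀ i : Nat, i < bs.length →
      ((tyx_bins.foldl (fun bs x =>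
          PySem.List.pySetD bs x.1 (PySem.Set.update (PySem.List.pyGetD bs x.1 PySem.Set.empty) x.2.2.2)) bs).getD i []) =
        PySem.Set.update (bs.getD i []) (pvVals (i : Int) tyx_bins) := by
  induction tyx_bins with
  | nil => intro bs _ i hi; simp [pvVals, pvPairs, PySem.Set.update]
  | cons x xs ih =>
    intro bs hb i hi
    obtain ⟨hx0, hxl⟩ := hb x (by simp)
    have hxn : x.1 = ((x.1.toNat : Nat) : Int) := by omega
    simp only [List.foldl_cons]
    rw [hxn, PySem.List.pySetD_natCast, PySem.List.pyGetD_natCast]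
    rw [ih _ (by intro y hy; simpa [List.length_set] using hb y (List.mem_cons_of_mem _ hy)) i
        (by simpa [List.length_set] using hi)]
    rw [pvVals_cons, PySem.Set.update_append]
    congr 1
    by_cases h : x.1 = (i : Int)
    · have hji : x.1.toNat = i := by omega
      rw [if_pos h, hji, List.getD_eq_getElem?_getD, List.getElem?_set_self (by omega),
        Option.getD_some]
      rfl
    · rw [if_neg h, PySem.Set.update_nil, List.getD_eq_getElem?_getD,
        List.getElem?_set_ne (by omega : x.1.toNat ≠ i), ← List.getD_eq_getElem?_getD]

-- the B-side scatter invariant: appending each sorted pair's value to its bin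
theorem scatterB (pairs : List (Int × Int)) :
    ∀ (rs : List (List Int)),
      (∀ p ∈ pairs, 0 ≤ p.1 ∧ p.1 < (rs.length : Int)) →
      ∀ i : Nat, i < rs.length →
      ((pairs.foldl (fun r p => PySem.List.pySetD r p.1 (PySem.List.pyGetD r p.1 [] ++ [p.2])) rs).getD i []) =
        rs.getD i [] ++ (pairs.filter (fun p => p.1 = (i : Int))).map Prod.snd := by
  induction pairs with
  | nil => intro rs _ i hi; simp
  | cons p ps ih =>
    intro rs hb i hi
    obtain ⟨hp0, hpl⟩ := hb p (by simp)
    have hpn : p.1 = ((p.1.toNat : Nat) : Int) := by omega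
    simp only [List.foldl_cons]
    rw [hpn, PySem.List.pySetD_natCast, PySem.List.pyGetD_natCast]
    rw [ih _ (by intro q hq; simpa [List.length_set] using hb q (List.mem_cons_of_mem _ hq)) i
        (by simpa [List.length_set] using hi)]
    by_cases h : p.1 = (i : Int)
    · have hji : p.1.toNat = i := by omega
      rw [List.filter_cons_of_pos (by simp [h]), hji, List.getD_eq_getElem?_getD,
        List.getElem?_set_self (by omega), Option.getD_some, List.map_cons,
        List.append_assoc, List.singleton_append]
    · rw [List.filter_cons_of_neg (by simp [h]), List.getD_eq_getElem?_getD,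
        List.getElem?_set_ne (by omega : p.1.toNat ≠ i), ← List.getD_eq_getElem?_getD]

-- foldl insertBy preserves a pairwise relation compatible with `before`
theorem insertBy_pairwise' {α : Type} (R : α → α → Prop) (before : α → α → Bool)
    (h1 : ∀ a b, before a b = true → R a b) (h2 : ∀ a b, before a b = false → R b a)
    (htr : ∀ a b c, R a b → R b c → R a c)
    (x : α) (ys : List α) (hp : List.Pairwise R ys) :
    List.Pairwise R (PySem.List.insertBy before x ys) := by
  induction ys with
  | nil => simp [PySem.List.insertBy]
  | cons y t ih =>
    rw [PySem.List.insertBy]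
    rcases hp with _ | ⟨hy, ht⟩
    by_cases hb : before x y
    · simp only [hb, if_true]
      refine List.Pairwise.cons ?_ (List.Pairwise.cons hy ht)
      intro z hz
      rcases List.mem_cons.mp hz with rfl | hz
      · exact h1 _ _ hb
      · exact htr _ _ _ (h1 _ _ hb) (hy z hz)
    · simp only [hb]
      refine List.Pairwise.cons ?_ (ih ht)
      intro z hz
      rcases (PySem.List.insertBy_mem_iff _ _ _ _).mp hz with rfl | hz
      · exact h2 _ _ (by simpa using hb)
      · exact hy z hz

def pvLexLE (a b : Int × Int) : Prop := a.1 < b.1 ∨ (a.1 = b.1 ∧ a.2 ≤ b.2)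

theorem sorted2_pairwise_lex (xs : List (Int × Int)) :
    List.Pairwise pvLexLE (PySem.List.sorted2 xs (fun p => p.1) (fun p => p.2)) := by
  rw [PySem.List.sorted2]
  simp only [if_neg (by simp : ¬ (false = true))]
  have : ∀ (l : List (Int × Int)) (acc : List (Int × Int)), List.Pairwise pvLexLE acc →
      List.Pairwise pvLexLE (l.foldl (fun acc x =>
        PySem.List.insertBy (fun a b => decide (a.1 < b.1) || (!decide (b.1 < a.1) && decide (a.2 < b.2))) x acc) acc) := by
    intro l
    induction l with
    | nil => intro acc h; simpa
    | cons x t ih =>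
      intro acc h
      exact ih _ (insertBy_pairwise' pvLexLE _
        (by intro a b hb; simp at hb; unfold pvLexLE; omega)
        (by intro a b hb; simp at hb; unfold pvLexLE; omega)
        (by intro a b c h1 h2; unfold pvLexLE at *; omega) x acc h)
  exact this xs [] (by simp)

theorem sorted2_perm' (xs : List (Int × Int)) :
    (PySem.List.sorted2 xs (fun p => p.1) (fun p => p.2)).Perm xs :=
  PySem.List.sorted2_perm xs _ _ _

theorem length_foldl_pySetD {α ι : Type} (f : ι → Int) (g : List α → ι → α) (items : List ι) :
    ∀ (rs : List α), (items.foldl (fun r p => PySem.List.pySetD r (f p) (g r p)) rs).length = rs.length := by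
  induction items with
  | nil => intro rs; rfl
  | cons p ps ih => intro rs; rw [List.foldl_cons, ih, PySem.List.length_pySetD]

-- generic facts about the constant-initialised bin list
theorem getD_to_getElem? {α : Type} (l : List α) (i : Nat) (d v : α) (hi : i < l.length)
    (h : l.getD i d = v) : l[i]? = some v := by
  rw [List.getElem?_eq_getElem hi, ← List.getD_eq_getElem l d hi, h]

theorem len_const {α : Type} (c : α) (n : Nat) :
    (((List.range n).map (fun (k : Nat) => (k : Int))).map (fun _ => c)).length = n := by simp

theorem getD_const {α : Type} (c d : α) (n i : Nat) (h : i < n) :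
    (((List.range n).map (fun (k : Nat) => (k : Int))).map (fun _ => c)).getD i d = c := by
  rw [List.getD_eq_getElem?_getD, List.getElem?_map, List.getElem?_map, List.getElem?_range h]
  rfl

-- the per-bin equality of the two folds, over an abstract bin count n
theorem mainLemma (n : Nat) (tyx : List (Int × Int × Int × List Int))
    (hb : ∀ x ∈ tyx, 0 ≤ x.1 ∧ x.1 < (n : Int)) :
    ((tyx.foldl (fun bs x =>
        PySem.List.pySetD bs x.1 (PySem.Set.update (PySem.List.pyGetD bs x.1 PySem.Set.empty) x.2.2.2))
        (((List.range n).map (fun (k : Nat) => (k : Int))).map (fun _ => PySem.Set.empty))).map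
          (fun b => PySem.List.sorted b (fun v => v)))
      = ((PySem.List.sorted2
          (PySem.Set.ofList (tyx.flatMap (fun x => x.2.2.2.map (fun v => (x.1, v)))))
          (fun p => p.1) (fun p => p.2)).foldl
          (fun r p => PySem.List.pySetD r p.1 (PySem.List.pyGetD r p.1 [] ++ [p.2]))
          (((List.range n).map (fun (k : Nat) => (k : Int))).map (fun _ => ([] : List Int)))) := by
  have hpairsmem : ∀ p : Int × Int, p ∈ PySem.List.sorted2
      (PySem.Set.ofList (tyx.flatMap (fun x => x.2.2.2.map (fun v => (x.1, v)))))
      (fun p => p.1) (fun p => p.2) ↔ p ∈ pvPairs tyx := by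
    intro p
    rw [(sorted2_perm' _).mem_iff, PySem.Set.mem_ofList]
    rfl
  have hpb : ∀ p ∈ PySem.List.sorted2
      (PySem.Set.ofList (tyx.flatMap (fun x => x.2.2.2.map (fun v => (x.1, v)))))
      (fun p => p.1) (fun p => p.2), 0 ≤ p.1 ∧ p.1 < (n : Int) := by
    intro p hp
    have hp' : p ∈ pvPairs tyx := (hpairsmem p).mp hp
    simp only [pvPairs, List.mem_flatMap, List.mem_map] at hp'
    obtain ⟨x, hx, v, hv, hpe⟩ := hp'
    subst hpe
    exact hb x hx
  have hAlen : (tyx.foldl (fun bs x =>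
      PySem.List.pySetD bs x.1 (PySem.Set.update (PySem.List.pyGetD bs x.1 PySem.Set.empty) x.2.2.2))
      (((List.range n).map (fun (k : Nat) => (k : Int))).map (fun _ => PySem.Set.empty))).length = n := by
    rw [length_foldl_pySetD (fun (x : Int × Int × Int × List Int) => x.1)
      (fun bs x => PySem.Set.update (PySem.List.pyGetD bs x.1 PySem.Set.empty) x.2.2.2) tyx,
      len_const]
  have hBlen : ((PySem.List.sorted2
      (PySem.Set.ofList (tyx.flatMap (fun x => x.2.2.2.map (fun v => (x.1, v)))))
      (fun p => p.1) (fun p => p.2)).foldl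
      (fun r p => PySem.List.pySetD r p.1 (PySem.List.pyGetD r p.1 [] ++ [p.2]))
      (((List.range n).map (fun (k : Nat) => (k : Int))).map (fun _ => ([] : List Int)))).length = n := by
    rw [length_foldl_pySetD (fun (p : Int × Int) => p.1)
      (fun r p => PySem.List.pyGetD r p.1 [] ++ [p.2]),
      len_const]
  apply List.ext_getElem?
  intro i
  by_cases hin : i < n
  · -- the interesting indices
    have hAi : i < (tyx.foldl (fun bs x =>
        PySem.List.pySetD bs x.1 (PySem.Set.update (PySem.List.pyGetD bs x.1 PySem.Set.empty) x.2.2.2))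
        (((List.range n).map (fun (k : Nat) => (k : Int))).map (fun _ => PySem.Set.empty))).length := by
      rw [hAlen]; exact hin
    have hBi : i < ((PySem.List.sorted2
        (PySem.Set.ofList (tyx.flatMap (fun x => x.2.2.2.map (fun v => (x.1, v)))))
        (fun p => p.1) (fun p => p.2)).foldl
        (fun r p => PySem.List.pySetD r p.1 (PySem.List.pyGetD r p.1 [] ++ [p.2]))
        (((List.range n).map (fun (k : Nat) => (k : Int))).map (fun _ => ([] : List Int)))).length := by
      rw [hBlen]; exact hin
    have hAval := gatherA tyx (((List.range n).map (fun (k : Nat) => (k : Int))).map (fun _ => PySem.Set.empty))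
      (by intro x hx; rw [len_const]; exact hb x hx) i (by rw [len_const]; exact hin)
    rw [getD_const _ _ _ _ hin] at hAval
    have hAval' : (tyx.foldl (fun bs x =>
        PySem.List.pySetD bs x.1 (PySem.Set.update (PySem.List.pyGetD bs x.1 PySem.Set.empty) x.2.2.2))
        (((List.range n).map (fun (k : Nat) => (k : Int))).map (fun _ => PySem.Set.empty))).getD i [] =
        PySem.Set.ofList (pvVals (i : Int) tyx) := hAval
    have hBval := scatterB (PySem.List.sorted2
        (PySem.Set.ofList (tyx.flatMap (fun x => x.2.2.2.map (fun v => (x.1, v)))))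
        (fun p => p.1) (fun p => p.2))
      (((List.range n).map (fun (k : Nat) => (k : Int))).map (fun _ => ([] : List Int)))
      (by intro p hp; rw [len_const]; exact hpb p hp) i (by rw [len_const]; exact hin)
    rw [getD_const _ _ _ _ hin, List.nil_append] at hBval
    rw [List.getElem?_map, getD_to_getElem? _ i [] _ hAi hAval',
      getD_to_getElem? _ i [] _ hBi hBval, Option.map_some]
    -- it remains to identify sorted(set(values of bin i)) with the scattered slice
    have hnodupPairs : (PySem.List.sorted2
        (PySem.Set.ofList (tyx.flatMap (fun x => x.2.2.2.map (fun v => (x.1, v)))))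
        (fun p => p.1) (fun p => p.2)).Nodup :=
      (sorted2_perm' _).symm.nodup (PySem.Set.nodup_ofList _)
    have hlex := sorted2_pairwise_lex
      (PySem.Set.ofList (tyx.flatMap (fun x => x.2.2.2.map (fun v => (x.1, v)))))
    have hfil : List.Pairwise (fun a b => pvLexLE a b ∧ a ≠ b)
        ((PySem.List.sorted2
          (PySem.Set.ofList (tyx.flatMap (fun x => x.2.2.2.map (fun v => (x.1, v)))))
          (fun p => p.1) (fun p => p.2)).filter (fun p => p.1 = (i : Int))) :=
      List.Pairwise.sublist List.filter_sublist (hlex.and hnodupPairs)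
    have hlt : List.Pairwise (· < ·)
        (((PySem.List.sorted2
          (PySem.Set.ofList (tyx.flatMap (fun x => x.2.2.2.map (fun v => (x.1, v)))))
          (fun p => p.1) (fun p => p.2)).filter (fun p => p.1 = (i : Int))).map Prod.snd) := by
      rw [List.pairwise_map]
      refine hfil.imp_of_mem ?_
      intro a b ha hb' hab
      have hai : a.1 = (i : Int) := by simpa using (List.mem_filter.mp ha).2
      have hbi' : b.1 = (i : Int) := by simpa using (List.mem_filter.mp hb').2
      obtain ⟨hle, hne⟩ := hab
      have hsne : a.2 ≠ b.2 := by
        intro hv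
        exact hne (Prod.ext_iff.mpr ⟨by omega, hv⟩)
      unfold pvLexLE at hle
      omega
    have hmemB : ∀ v, v ∈ (((PySem.List.sorted2
        (PySem.Set.ofList (tyx.flatMap (fun x => x.2.2.2.map (fun v => (x.1, v)))))
        (fun p => p.1) (fun p => p.2)).filter (fun p => p.1 = (i : Int))).map Prod.snd) ↔
        v ∈ PySem.Set.ofList (pvVals (i : Int) tyx) := by
      intro v
      rw [PySem.Set.mem_ofList, mem_pvVals]
      simp only [List.mem_map, List.mem_filter]
      constructor
      · rintro ⟨p, ⟨hp, he⟩, rfl⟩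
        have hpe : p = ((i : Int), p.2) := by
          cases p; simp at he ⊢; omega
        rw [hpe] at hp
        exact (hpairsmem _).mp hp
      · intro h
        exact ⟨((i : Int), v), ⟨(hpairsmem _).mpr h, by simp⟩, rfl⟩
    have hperm := (List.perm_ext_iff_of_nodup (hlt.imp ne_of_lt)
      (PySem.Set.nodup_ofList (pvVals (i : Int) tyx))).mpr hmemB
    exact congrArg some
      (PySem.List.sorted_eq_of_perm_of_pairwise_lt _ _ (fun v => v) hperm hlt)
  · -- past the end: both sides are out of range
    rw [List.getElem?_eq_none, List.getElem?_eq_none]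
    · rw [hBlen]; omega
    · rw [List.length_map, hAlen]; omega

-- main pointwise equality of the two ports
theorem ports_agree (tyx_bins : List (Int × Int × Int × List Int))
    (_hne : tyx_bins ≠ []) (hpos : ∀ x ∈ tyx_bins, 0 ≤ x.1) :
    bin_by_time_py tyx_bins = bin_by_time_py_alt tyx_bins := by
  unfold bin_by_time_py bin_by_time_py_alt
  cases hm : PySem.List.max? (tyx_bins.map (fun x => x.1)) (fun t => t) with
  | none => rfl
  | some m =>
    have hmax : ∀ x ∈ tyx_bins, x.1 ≤ m := by
      intro x hx
      exact PySem.List.max?_isMax hm x.1 (List.mem_map.mpr ⟨x, hx, rfl⟩)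
    have hm0 : 0 ≤ m := by
      obtain ⟨x, hx, hxe⟩ := List.mem_map.mp (PySem.List.max?_mem hm)
      have := hpos x hx; omega
    have hmn : m + 1 = ((m.toNat + 1 : Nat) : Int) := by omega
    show ((tyx_bins.foldl (fun bs x =>
        PySem.List.pySetD bs x.1 (PySem.Set.update (PySem.List.pyGetD bs x.1 PySem.Set.empty) x.2.2.2))
        ((PySem.List.pyRange 0 (m + 1)).map (fun _ => PySem.Set.empty))).map
          (fun b => PySem.List.sorted b (fun v => v)))
      = ((PySem.List.sorted2
          (PySem.Set.ofList (tyx_bins.flatMap (fun x => x.2.2.2.map (fun v => (x.1, v)))))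
          (fun p => p.1) (fun p => p.2)).foldl
          (fun r p => PySem.List.pySetD r p.1 (PySem.List.pyGetD r p.1 [] ++ [p.2]))
          ((PySem.List.pyRange 0 (m + 1)).map (fun _ => ([] : List Int))))
    rw [hmn, PySem.List.pyRange_zero_natCast]
    exact mainLemma (m.toNat + 1) tyx_bins
      (fun x hx => ⟨hpos x hx, by have := hmax x hx; omega⟩)

-- ===== VERDICT (by name: the statement is the Claim_ definition above) =====
theorem bin_by_time_py_spec : Claim_equal_bin_by_time_py := by
  intro tyx_bins _ hpre
  exact ports_agree tyx_bins hpre.1 hpre.2.1
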